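-- pv_equiv track=rewrite | github.com/ckoons/BubbleSpacetimeTheory | play/toy_1125_numerology_filter_bst.py | bst_products
-- ===== SOURCE A (Python) =====
-- N_c = 3
--
-- n_C = 5
--
-- g = 7
--
-- C_2 = 6
--
-- rank = 2
--
-- N_max = 137
--
-- def bst_products(limit=300):
--     """Generate all products of BST integers up to limit."""
--     prods = set()
--     base = [N_c, n_C, g, C_2, rank, N_max]
--     # Single integers
--     for b in base:
--         if b <= limit:
--             prods.add(b)
--     # Products of pairs
--     for i, a in enumerate(base):
--         for b in base[i:]:
--             p = a * b
--             if p <= limit: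
--                 prods.add(p)
--     # Products of triples
--     for i, a in enumerate(base):
--         for j, b in enumerate(base[i:], i):
--             for c in base[j:]:
--                 p = a * b * c
--                 if p <= limit:
--                     prods.add(p)
--     # Common BST products explicitly
--     explicit = [
--         1, 2, 3, 4, 5, 6, 7, 9, 10, 12, 14, 15, 18, 20, 21, 25, 30, 35, 36,
--         42, 45, 49, 50, 60, 70, 72, 84, 90, 98, 100, 105, 108, 120, 126,
--         137, 140, 147, 150, 175, 180, 196, 200, 210, 245, 250, 252, 280,
--     ]
--     for e in explicit:
--         if e <= limit:
--             prods.add(e)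
--     return sorted(prods)
-- ===== SOURCE B (Python) =====
-- N_c = 3
-- n_C = 5
-- g = 7
-- C_2 = 6
-- rank = 2
-- N_max = 137
--
-- def bst_products(limit=300):
--     """Generate all products of BST integers up to limit."""
--     base = [N_c, n_C, g, C_2, rank, N_max]
--     explicit = [
--         1, 2, 3, 4, 5, 6, 7, 9, 10, 12, 14, 15, 18, 20, 21, 25, 30, 35, 36,
--         42, 45, 49, 50, 60, 70, 72, 84, 90, 98, 100, 105, 108, 120, 126,
--         137, 140, 147, 150, 175, 180, 196, 200, 210, 245, 250, 252, 280,
--     ]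
--
--     def combos(r, start, acc):
--         # products of r base elements with non-decreasing indices >= start
--         if r == 0:
--             return [acc]
--         out = []
--         for k in range(start, len(base)):
--             out += combos(r - 1, k, acc * base[k])
--         return out
--
--     prods = set(e for e in explicit if e <= limit)
--     for r in (1, 2, 3):
--         for p in combos(r, 0, 1):
--             if p <= limit:
--                 prods.add(p)
--     return sorted(prods)
-- ===== Notes on version B (the rewrite author's own statement) =====
-- stated objective: simpler
-- what changed: Replaces A's three hand-written loop nests (singles, pairs, triples with enumerate/slice index bookkeeping) by one recursive generator of non-decreasing-index combinations called once per arity (singles, pairs, triples), and builds the set from the filtered explicit list in one comprehension.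
import Mathlib
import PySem

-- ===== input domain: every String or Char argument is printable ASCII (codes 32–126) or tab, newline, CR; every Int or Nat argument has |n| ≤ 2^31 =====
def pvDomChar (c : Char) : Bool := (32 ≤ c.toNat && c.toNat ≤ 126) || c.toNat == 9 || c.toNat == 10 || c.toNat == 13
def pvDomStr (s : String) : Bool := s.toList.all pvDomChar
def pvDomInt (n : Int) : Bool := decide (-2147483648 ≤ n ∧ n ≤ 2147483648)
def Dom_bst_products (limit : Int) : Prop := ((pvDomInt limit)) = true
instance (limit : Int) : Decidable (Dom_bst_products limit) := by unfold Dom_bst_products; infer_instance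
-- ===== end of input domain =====

-- B replaces A's three hand-written loop nests by one recursive generator of
-- non-decreasing index combinations (objective: simpler, one mechanism for all arities).

def pyBase : List Int := [3, 5, 7, 6, 2, 137]

def pyExplicit : List Int :=
  [1, 2, 3, 4, 5, 6, 7, 9, 10, 12, 14, 15, 18, 20, 21, 25, 30, 35, 36,
   42, 45, 49, 50, 60, 70, 72, 84, 90, 98, 100, 105, 108, 120, 126,
   137, 140, 147, 150, 175, 180, 196, 200, 210, 245, 250, 252, 280]

-- ===== PORT A =====
def bst_products (limit : Int) : List Int :=
  let prods : PySem.Set Int := PySem.Set.empty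
  let base := pyBase
  -- Single integers
  let prods := base.foldl (fun s b => if b ≤ limit then PySem.Set.add s b else s) prods
  -- Products of pairs
  let prods := (PySem.List.enumerate base).foldl (fun s ia =>
      (PySem.List.slice base (some ia.1) none).foldl
        (fun s b => if ia.2 * b ≤ limit then PySem.Set.add s (ia.2 * b) else s) s) prods
  -- Products of triples
  let prods := (PySem.List.enumerate base).foldl (fun s ia =>
      (PySem.List.enumerate (PySem.List.slice base (some ia.1) none) ia.1).foldl
        (fun s jb =>
          (PySem.List.slice base (some jb.1) none).foldl
            (fun s c => if ia.2 * jb.2 * c ≤ limit then PySem.Set.add s (ia.2 * jb.2 * c) else s) s) s) prods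
  -- Common BST products explicitly
  let prods := pyExplicit.foldl (fun s e => if e ≤ limit then PySem.Set.add s e else s) prods
  PySem.List.sorted prods (fun x => x) false

-- ===== PORT B =====
-- products of r base elements with non-decreasing indices ≥ start  (Source B's `combos`)
def combosB : Nat → Int → Int → List Int
  | 0, _, acc => [acc]
  | r + 1, start, acc =>
      (PySem.List.pyRange start (pyBase.length : Int) 1).foldl
        (fun out k => out ++ combosB r k (acc * PySem.List.pyGetD pyBase k 0)) []

def bst_products_alt (limit : Int) : List Int :=
  let prods : PySem.Set Int := PySem.Set.ofList (pyExplicit.filter (fun e => e ≤ limit))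
  let prods := ([1, 2, 3] : List Nat).foldl (fun s r =>
      (combosB r 0 1).foldl (fun s p => if p ≤ limit then PySem.Set.add s p else s) s) prods
  PySem.List.sorted prods (fun x => x) false

-- ===== PRECONDITION & SPEC =====
def Spec_bst_products (limit : Int) (out : List Int) : Prop := out = bst_products_alt limit
instance (limit : Int) (out : List Int) : Decidable (Spec_bst_products limit out) := by unfold Spec_bst_products; infer_instance

-- ===== CLAIM (what is proved, stated in full; the proofs are below) =====
def Claim_equal_bst_products : Prop := ∀ (limit : Int), Dom_bst_products limit → Spec_bst_products limit (bst_products limit)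

-- ===== LEMMAS AND PROOFS =====

-- membership / nodup for a fold whose step adds those of the values `V a` that are ≤ limit
theorem foldl_addIf_spec {α : Type} (limit : Int) (V : α → List Int)
    (g : PySem.Set Int → α → PySem.Set Int)
    (hmem : ∀ s a x, x ∈ g s a ↔ x ∈ s ∨ (x ≤ limit ∧ x ∈ V a))
    (hnd : ∀ s a, s.Nodup → (g s a).Nodup) (L : List α) :
    ∀ (s : PySem.Set Int),
      (∀ x, x ∈ L.foldl g s ↔ x ∈ s ∨ (x ≤ limit ∧ x ∈ L.flatMap V)) ∧
      (s.Nodup → (L.foldl g s).Nodup) := by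
  induction L with
  | nil => intro s; simp
  | cons a L ih =>
      intro s
      refine ⟨fun x => ?_, fun h => (ih (g s a)).2 (hnd s a h)⟩
      rw [List.foldl_cons, (ih (g s a)).1 x, hmem]
      simp only [List.flatMap_cons, List.mem_append]
      tauto

-- the atomic step `if v ≤ limit then s.add v else s`
theorem addIf_mem (limit v : Int) (s : PySem.Set Int) (x : Int) :
    x ∈ (if v ≤ limit then PySem.Set.add s v else s) ↔ x ∈ s ∨ (x ≤ limit ∧ x ∈ [v]) := by
  split_ifs with h
  · simp only [PySem.Set.mem_add, List.mem_singleton]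
    constructor
    · rintro (hx | rfl)
      · exact Or.inl hx
      · exact Or.inr ⟨h, rfl⟩
    · rintro (hx | ⟨_, rfl⟩)
      · exact Or.inl hx
      · exact Or.inr rfl
  · simp only [List.mem_singleton]
    constructor
    · exact Or.inl
    · rintro (hx | ⟨hxl, rfl⟩)
      · exact hx
      · exact absurd hxl h

theorem addIf_nodup (limit v : Int) (s : PySem.Set Int) (h : s.Nodup) :
    (if v ≤ limit then PySem.Set.add s v else s).Nodup := by
  split_ifs
  · exact PySem.Set.nodup_add s v h
  · exact h

-- the intermediate sets of A's chain
def setA1 (limit : Int) : PySem.Set Int :=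
  pyBase.foldl (fun s b => if b ≤ limit then PySem.Set.add s b else s) PySem.Set.empty

def setA2 (limit : Int) : PySem.Set Int :=
  (PySem.List.enumerate pyBase).foldl (fun s ia =>
      (PySem.List.slice pyBase (some ia.1) none).foldl
        (fun s b => if ia.2 * b ≤ limit then PySem.Set.add s (ia.2 * b) else s) s) (setA1 limit)

def setA3 (limit : Int) : PySem.Set Int :=
  (PySem.List.enumerate pyBase).foldl (fun s ia =>
      (PySem.List.enumerate (PySem.List.slice pyBase (some ia.1) none) ia.1).foldl
        (fun s jb =>
          (PySem.List.slice pyBase (some jb.1) none).foldl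
            (fun s c => if ia.2 * jb.2 * c ≤ limit then PySem.Set.add s (ia.2 * jb.2 * c) else s) s) s)
    (setA2 limit)

def setA4 (limit : Int) : PySem.Set Int :=
  pyExplicit.foldl (fun s e => if e ≤ limit then PySem.Set.add s e else s) (setA3 limit)

theorem bst_products_eq (limit : Int) :
    bst_products limit = PySem.List.sorted (setA4 limit) (fun x => x) false := rfl

-- B's set
def setB (limit : Int) : PySem.Set Int :=
  ([1, 2, 3] : List Nat).foldl (fun s r =>
      (combosB r 0 1).foldl (fun s p => if p ≤ limit then PySem.Set.add s p else s) s)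
    (PySem.Set.ofList (pyExplicit.filter (fun e => e ≤ limit)))

theorem bst_products_alt_eq (limit : Int) :
    bst_products_alt limit = PySem.List.sorted (setB limit) (fun x => x) false := rfl

-- candidate-value lists (limit-free)
def valsA : List Int :=
  pyBase.flatMap (fun b => [b]) ++
  (PySem.List.enumerate pyBase).flatMap (fun ia =>
    (PySem.List.slice pyBase (some ia.1) none).flatMap (fun b => [ia.2 * b])) ++
  (PySem.List.enumerate pyBase).flatMap (fun ia =>
    (PySem.List.enumerate (PySem.List.slice pyBase (some ia.1) none) ia.1).flatMap (fun jb =>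
      (PySem.List.slice pyBase (some jb.1) none).flatMap (fun c => [ia.2 * jb.2 * c]))) ++
  pyExplicit

def valsB : List Int :=
  pyExplicit ++ ([1, 2, 3] : List Nat).flatMap (fun r => (combosB r 0 1).flatMap (fun p => [p]))

set_option maxRecDepth 40000 in
theorem vals_same (x : Int) : x ∈ valsA ↔ x ∈ valsB := by
  rw [← List.mem_toFinset, ← List.mem_toFinset (l := valsB)]
  have h : valsA.toFinset = valsB.toFinset := by decide
  rw [h]

-- layer specs for A
theorem specA1 (limit : Int) :
    (∀ x, x ∈ setA1 limit ↔ x ≤ limit ∧ x ∈ pyBase.flatMap (fun b => [b])) ∧ (setA1 limit).Nodup := by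
  have h := foldl_addIf_spec limit (fun b => [b]) _
    (fun s b x => addIf_mem limit b s x) (fun s b hs => addIf_nodup limit b s hs) pyBase
    PySem.Set.empty
  exact ⟨fun x => by unfold setA1; rw [(h.1 x)]; simp [PySem.Set.empty], by unfold setA1; exact h.2 (by simp [PySem.Set.empty])⟩

theorem specA2 (limit : Int) :
    (∀ x, x ∈ setA2 limit ↔ x ∈ setA1 limit ∨ (x ≤ limit ∧
      x ∈ (PySem.List.enumerate pyBase).flatMap (fun ia =>
        (PySem.List.slice pyBase (some ia.1) none).flatMap (fun b => [ia.2 * b])))) ∧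
    (setA2 limit).Nodup := by
  have h := foldl_addIf_spec limit
    (fun ia : Int × Int => (PySem.List.slice pyBase (some ia.1) none).flatMap (fun b => [ia.2 * b]))
    _
    (fun s ia x => (foldl_addIf_spec limit (fun b => [ia.2 * b]) _
        (fun s b x => addIf_mem limit (ia.2 * b) s x)
        (fun s b hs => addIf_nodup limit (ia.2 * b) s hs)
        (PySem.List.slice pyBase (some ia.1) none) s).1 x)
    (fun s ia hs => (foldl_addIf_spec limit (fun b => [ia.2 * b]) _
        (fun s b x => addIf_mem limit (ia.2 * b) s x)
        (fun s b hs => addIf_nodup limit (ia.2 * b) s hs)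
        (PySem.List.slice pyBase (some ia.1) none) s).2 hs)
    (PySem.List.enumerate pyBase) (setA1 limit)
  exact ⟨h.1, h.2 (specA1 limit).2⟩

theorem specA3 (limit : Int) :
    (∀ x, x ∈ setA3 limit ↔ x ∈ setA2 limit ∨ (x ≤ limit ∧
      x ∈ (PySem.List.enumerate pyBase).flatMap (fun ia =>
        (PySem.List.enumerate (PySem.List.slice pyBase (some ia.1) none) ia.1).flatMap (fun jb =>
          (PySem.List.slice pyBase (some jb.1) none).flatMap (fun c => [ia.2 * jb.2 * c]))))) ∧
    (setA3 limit).Nodup := by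
  have h := foldl_addIf_spec limit
    (fun ia : Int × Int =>
      (PySem.List.enumerate (PySem.List.slice pyBase (some ia.1) none) ia.1).flatMap (fun jb =>
        (PySem.List.slice pyBase (some jb.1) none).flatMap (fun c => [ia.2 * jb.2 * c])))
    _
    (fun s ia x => (foldl_addIf_spec limit
        (fun jb : Int × Int => (PySem.List.slice pyBase (some jb.1) none).flatMap
          (fun c => [ia.2 * jb.2 * c]))
        _
        (fun s jb x => (foldl_addIf_spec limit (fun c => [ia.2 * jb.2 * c]) _
            (fun s c x => addIf_mem limit (ia.2 * jb.2 * c) s x)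
            (fun s c hs => addIf_nodup limit (ia.2 * jb.2 * c) s hs)
            (PySem.List.slice pyBase (some jb.1) none) s).1 x)
        (fun s jb hs => (foldl_addIf_spec limit (fun c => [ia.2 * jb.2 * c]) _
            (fun s c x => addIf_mem limit (ia.2 * jb.2 * c) s x)
            (fun s c hs => addIf_nodup limit (ia.2 * jb.2 * c) s hs)
            (PySem.List.slice pyBase (some jb.1) none) s).2 hs)
        (PySem.List.enumerate (PySem.List.slice pyBase (some ia.1) none) ia.1) s).1 x)
    (fun s ia hs => (foldl_addIf_spec limit
        (fun jb : Int × Int => (PySem.List.slice pyBase (some jb.1) none).flatMap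
          (fun c => [ia.2 * jb.2 * c]))
        _
        (fun s jb x => (foldl_addIf_spec limit (fun c => [ia.2 * jb.2 * c]) _
            (fun s c x => addIf_mem limit (ia.2 * jb.2 * c) s x)
            (fun s c hs => addIf_nodup limit (ia.2 * jb.2 * c) s hs)
            (PySem.List.slice pyBase (some jb.1) none) s).1 x)
        (fun s jb hs => (foldl_addIf_spec limit (fun c => [ia.2 * jb.2 * c]) _
            (fun s c x => addIf_mem limit (ia.2 * jb.2 * c) s x)
            (fun s c hs => addIf_nodup limit (ia.2 * jb.2 * c) s hs)
            (PySem.List.slice pyBase (some jb.1) none) s).2 hs)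
        (PySem.List.enumerate (PySem.List.slice pyBase (some ia.1) none) ia.1) s).2 hs)
    (PySem.List.enumerate pyBase) (setA2 limit)
  exact ⟨h.1, h.2 (specA2 limit).2⟩

theorem specA4 (limit : Int) :
    (∀ x, x ∈ setA4 limit ↔ x ≤ limit ∧ x ∈ valsA) ∧ (setA4 limit).Nodup := by
  have h := foldl_addIf_spec limit (fun e => [e]) _
    (fun s e x => addIf_mem limit e s x) (fun s e hs => addIf_nodup limit e s hs) pyExplicit
    (setA3 limit)
  refine ⟨fun x => ?_, h.2 (specA3 limit).2⟩
  unfold setA4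
  rw [h.1 x, (specA3 limit).1 x, (specA2 limit).1 x, (specA1 limit).1 x]
  have hexp : x ∈ pyExplicit.flatMap (fun e => [e]) ↔ x ∈ pyExplicit := by
    simp
  rw [hexp]
  simp only [valsA, List.mem_append]
  tauto

theorem specB (limit : Int) :
    (∀ x, x ∈ setB limit ↔ x ≤ limit ∧ x ∈ valsB) ∧ (setB limit).Nodup := by
  have h := foldl_addIf_spec limit
    (fun r : Nat => (combosB r 0 1).flatMap (fun p => [p])) _
    (fun s r x => (foldl_addIf_spec limit (fun p => [p]) _
        (fun s p x => addIf_mem limit p s x) (fun s p hs => addIf_nodup limit p s hs)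
        (combosB r 0 1) s).1 x)
    (fun s r hs => (foldl_addIf_spec limit (fun p => [p]) _
        (fun s p x => addIf_mem limit p s x) (fun s p hs => addIf_nodup limit p s hs)
        (combosB r 0 1) s).2 hs)
    ([1, 2, 3] : List Nat) (PySem.Set.ofList (pyExplicit.filter (fun e => e ≤ limit)))
  refine ⟨fun x => ?_, h.2 (PySem.Set.nodup_ofList _)⟩
  unfold setB
  rw [h.1 x, PySem.Set.mem_ofList, List.mem_filter]
  simp only [valsB, List.mem_append, decide_eq_true_eq]
  tauto

theorem bst_products_spec' (limit : Int) : bst_products limit = bst_products_alt limit := by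
  rw [bst_products_eq, bst_products_alt_eq]
  refine PySem.List.sorted_eq_sorted_of_perm _ _ _ (fun a b h => h) ?_
  refine (List.perm_ext_iff_of_nodup (specA4 limit).2 (specB limit).2).2 (fun a => ?_)
  rw [(specA4 limit).1 a, (specB limit).1 a, vals_same]

-- ===== VERDICT (by name: the statement is the Claim_ definition above) =====
theorem bst_products_spec : Claim_equal_bst_products := by
  intro limit _
  exact bst_products_spec' limit
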